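-- pv_equiv track=rewrite | github.com/Antoniosiqueiracnpi-t/Projeto_Monalytics | src/capturar_acoes.py | extrair_ticker_inteligente
-- ===== SOURCE A (Python) =====
-- def extrair_ticker_inteligente(ticker_str: str) -> str:
--     """Prioriza ON (3) > PN (4) > outros."""
--     ticker_str = ticker_str.strip().upper()
--
--     if ';' not in ticker_str:
--         return ticker_str
--
--     tickers = [t.strip() for t in ticker_str.split(';') if t.strip()]
--
--     if not tickers:
--         return ticker_str
--
--     tickers_3 = [t for t in tickers if t.endswith('3')]
--     if tickers_3:
--         return tickers_3[0]
--
--     tickers_4 = [t for t in tickers if t.endswith('4')]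
--     if tickers_4:
--         return tickers_4[0]
--
--     return tickers[0]
-- ===== SOURCE B (Python) =====
-- def extrair_ticker_inteligente(ticker_str: str) -> str:
--     """Prioriza ON (3) > PN (4) > outros — one pass over the tokens."""
--     ticker_str = ticker_str.strip().upper()
--
--     if ';' not in ticker_str:
--         return ticker_str
--
--     first_3 = first_4 = first_any = None
--     for raw in ticker_str.split(';'):
--         t = raw.strip()
--         if not t:
--             continue
--         if first_any is None:
--             first_any = t
--         if first_3 is None and t.endswith('3'):
--             first_3 = t
--         if first_4 is None and t.endswith('4'):
--             first_4 = t
--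
--     if first_any is None:
--         return ticker_str
--     if first_3 is not None:
--         return first_3
--     if first_4 is not None:
--         return first_4
--     return first_any
-- ===== Notes on version B (the rewrite author's own statement) =====
-- stated objective: alternative
-- what changed: Replaces the materialised token list plus three separate filter-and-index passes with a single loop over the split pieces that records, as it goes, the first ON-suffix token, the first PN-suffix token and the first nonempty token.
import Mathlib
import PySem

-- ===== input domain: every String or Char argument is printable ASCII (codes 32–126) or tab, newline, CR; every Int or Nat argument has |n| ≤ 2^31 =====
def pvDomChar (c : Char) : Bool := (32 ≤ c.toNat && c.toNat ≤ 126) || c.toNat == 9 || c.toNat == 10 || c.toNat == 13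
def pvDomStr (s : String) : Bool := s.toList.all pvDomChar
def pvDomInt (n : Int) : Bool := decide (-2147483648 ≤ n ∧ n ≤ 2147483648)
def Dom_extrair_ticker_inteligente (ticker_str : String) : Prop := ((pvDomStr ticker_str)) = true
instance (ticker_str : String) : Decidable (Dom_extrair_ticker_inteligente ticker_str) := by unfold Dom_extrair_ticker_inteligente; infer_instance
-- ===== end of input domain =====

-- B replaces A's materialised token list and three filter-and-index passes by one loop recording the first candidate of each kind (alternative decomposition, same cost).

-- ===== PORT A =====
def extrair_ticker_inteligente (ticker_str : String) : String :=
  let ts := PySem.Str.upper (PySem.Str.strip ticker_str)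
  if PySem.Str.isIn ";" ts = false then ts   -- if ';' not in ticker_str
  else
    -- [t.strip() for t in ticker_str.split(';') if t.strip()]
    let tickers := ((PySem.Str.split? ts ";").getD []).filterMap (fun t =>
      let s := PySem.Str.strip t
      if s ≠ "" then some s else none)
    if tickers = [] then ts
    else
      let tickers_3 := tickers.filter (fun t => PySem.Str.endswith t "3")
      if tickers_3 ≠ [] then tickers_3.headD ""   -- tickers_3[0]; the guard makes it total
      else
        let tickers_4 := tickers.filter (fun t => PySem.Str.endswith t "4")
        if tickers_4 ≠ [] then tickers_4.headD ""
        else tickers.headD ""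

-- ===== PORT B =====
-- the single loop of Source B, state = (first_3, first_4, first_any)
def pvLoopB : List String → Option String → Option String → Option String →
    Option String × Option String × Option String
  | [], f3, f4, fa => (f3, f4, fa)
  | raw :: rest, f3, f4, fa =>
    let t := PySem.Str.strip raw
    if t = "" then pvLoopB rest f3 f4 fa
    else
      pvLoopB rest
        (if f3.isNone && PySem.Str.endswith t "3" then some t else f3)
        (if f4.isNone && PySem.Str.endswith t "4" then some t else f4)
        (if fa.isNone then some t else fa)

def extrair_ticker_inteligente_alt (ticker_str : String) : String :=
  let ts := PySem.Str.upper (PySem.Str.strip ticker_str)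
  if PySem.Str.isIn ";" ts = false then ts
  else
    let r := pvLoopB ((PySem.Str.split? ts ";").getD []) none none none
    match r.2.2 with
    | none => ts
    | some a =>
      match r.1 with
      | some x => x
      | none =>
        match r.2.1 with
        | some y => y
        | none => a

-- ===== PRECONDITION & SPEC =====
def Spec_extrair_ticker_inteligente (ticker_str : String) (out : String) : Prop := out = extrair_ticker_inteligente_alt ticker_str
instance (ticker_str : String) (out : String) : Decidable (Spec_extrair_ticker_inteligente ticker_str out) := by unfold Spec_extrair_ticker_inteligente; infer_instance

-- ===== CLAIM (what is proved, stated in full; the proofs are below) =====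
def Claim_equal_extrair_ticker_inteligente : Prop := ∀ (ticker_str : String), Dom_extrair_ticker_inteligente ticker_str → Spec_extrair_ticker_inteligente ticker_str (extrair_ticker_inteligente ticker_str)

-- ===== LEMMAS AND PROOFS =====

-- the loop keeps each accumulator if already set, else takes the head of the corresponding filtered token list
theorem pvLoopB_spec (toks : List String) (f3 f4 fa : Option String) :
    pvLoopB toks f3 f4 fa =
      (f3.or (((toks.filterMap (fun t =>
            let s := PySem.Str.strip t
            if s ≠ "" then some s else none)).filter (fun t => PySem.Str.endswith t "3")).head?),
       f4.or (((toks.filterMap (fun t =>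
            let s := PySem.Str.strip t
            if s ≠ "" then some s else none)).filter (fun t => PySem.Str.endswith t "4")).head?),
       fa.or ((toks.filterMap (fun t =>
            let s := PySem.Str.strip t
            if s ≠ "" then some s else none)).head?)) := by
  induction toks generalizing f3 f4 fa with
  | nil => simp [pvLoopB]
  | cons raw rest ih =>
    simp only [pvLoopB]
    by_cases hs : PySem.Str.strip raw = ""
    · simp [hs, ih]
    · cases f3 <;> cases f4 <;> cases fa <;>
        by_cases h3 : PySem.Chars.endswith (PySem.Chars.strip raw.toList) ['3'] = true <;>
        by_cases h4 : PySem.Chars.endswith (PySem.Chars.strip raw.toList) ['4'] = true <;>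
        simp [hs, ih, h3, h4]

-- ===== VERDICT (by name: the statement is the Claim_ definition above) =====
theorem extrair_ticker_inteligente_spec : Claim_equal_extrair_ticker_inteligente := by
  intro ticker_str _
  unfold Spec_extrair_ticker_inteligente
  simp only [extrair_ticker_inteligente, extrair_ticker_inteligente_alt]
  by_cases hin : PySem.Str.isIn ";" (PySem.Str.upper (PySem.Str.strip ticker_str)) = false
  · rw [if_pos hin, if_pos hin]
  · rw [if_neg hin, if_neg hin, pvLoopB_spec]
    simp only [Option.none_or]
    generalize (List.filterMap (fun t =>
        let s := PySem.Str.strip t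
        if s ≠ "" then some s else none)
      ((PySem.Str.split? (PySem.Str.upper (PySem.Str.strip ticker_str)) ";").getD [])) = tk
    cases tk with
    | nil => simp
    | cons x xs =>
      rw [if_neg (by simp)]
      cases h3 : (x :: xs).filter (fun t => PySem.Str.endswith t "3") with
      | cons z zs => simp
      | nil =>
        rw [if_neg (by simp)]
        cases h4 : (x :: xs).filter (fun t => PySem.Str.endswith t "4") with
        | cons w ws => simp
        | nil => simp
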